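-- pv_equiv track=rewrite | github.com/mikemaer1990/Daily-Gaming-News-Discord-Bot | src/discord/webhook_sender.py | format_game_message
-- ===== SOURCE A (Python) =====
-- from typing import List, Dict
--
-- def format_game_message(
--     game_name: str, items: List[Dict], is_trending: bool = False
-- ) -> str:
--     """
--     Format a game's content as a simple numbered list.
--
--     Args:
--         game_name: Name of the game or section
--         items: List of content items
--         is_trending: Whether this is the trending section
--
--     Returns:
--         Formatted message string (max 2000 chars for Discord limit)
--     """
--     MAX_MESSAGE_LENGTH = 2000
--     MAX_TITLE_LENGTH = 100
--
--     if not items: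
--         fallback_msg = "No trending news found this week." if is_trending else "No new content found this week."
--         return f"**{game_name} - Top {len(items)}**\n\n{fallback_msg}"
--
--     # Start with header
--     message = f"**{game_name} - Top {len(items)}**\n\n"
--
--     # Add each item as numbered list
--     for idx, item in enumerate(items, 1):
--         source = item.get("source", "Unknown")
--         title = item.get("title", "No title").strip()
--         url = item.get("url", "")
--
--         # Truncate long titles
--         if len(title) > MAX_TITLE_LENGTH:
--             title = title[:MAX_TITLE_LENGTH - 3] + "..."
--
--         # Format as: 1. [Source] Title - <URL>
--         # Angle brackets prevent Discord from generating link previews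
--         line = f"{idx}. [{source}] {title} - <{url}>\n"
--
--         # Check if adding this line would exceed the limit
--         if len(message) + len(line) > MAX_MESSAGE_LENGTH:
--             # Truncate and add indicator that items were cut
--             remaining = MAX_MESSAGE_LENGTH - len(message) - 20
--             if remaining > 0:
--                 message += f"... and {len(items) - idx + 1} more items"
--             break
--
--         message += line
--
--     return message
-- ===== SOURCE B (Python) =====
-- def _format_line(idx, item):
--     source = item.get("source", "Unknown")
--     title = item.get("title", "No title").strip()
--     if len(title) > 100:
--         title = title[:97] + "..."
--     url = item.get("url", "")
--     return f"{idx}. [{source}] {title} - <{url}>\n"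
--
--
-- def format_game_message(game_name, items, is_trending=False):
--     n = len(items)
--     header = f"**{game_name} - Top {n}**\n\n"
--     if not items:
--         fallback = "No trending news found this week." if is_trending else "No new content found this week."
--         return header + fallback
--     # pass 1: format every numbered line
--     lines = [_format_line(i, item) for i, item in enumerate(items, 1)]
--     # pass 2: pure length arithmetic -- prefix sums of line lengths decide how
--     # many whole lines fit in 2000 chars (k) and the length they use (used);
--     # no string is built here
--     k = 0
--     used = total = len(header)
--     for ln in lines:
--         total += len(ln)
--         if total <= 2000:
--             k += 1
--             used = total
--     # pass 3: assemble the result once, by slicing and joining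
--     if k == n:
--         return header + "".join(lines)
--     tail = f"... and {n - k} more items" if 2000 - used - 20 > 0 else ""
--     return header + "".join(lines[:k]) + tail
-- ===== Notes on version B (the rewrite author's own statement) =====
-- stated objective: alternative
-- what changed: A builds the message incrementally in one fused loop (format line, check limit, append, break); B never appends inside a loop: it formats all lines, computes prefix sums of their lengths to determine arithmetically how many lines fit (k) and the length they use, then assembles the result once as header + ''.join(lines[:k]) + optional tail.
import Mathlib
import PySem

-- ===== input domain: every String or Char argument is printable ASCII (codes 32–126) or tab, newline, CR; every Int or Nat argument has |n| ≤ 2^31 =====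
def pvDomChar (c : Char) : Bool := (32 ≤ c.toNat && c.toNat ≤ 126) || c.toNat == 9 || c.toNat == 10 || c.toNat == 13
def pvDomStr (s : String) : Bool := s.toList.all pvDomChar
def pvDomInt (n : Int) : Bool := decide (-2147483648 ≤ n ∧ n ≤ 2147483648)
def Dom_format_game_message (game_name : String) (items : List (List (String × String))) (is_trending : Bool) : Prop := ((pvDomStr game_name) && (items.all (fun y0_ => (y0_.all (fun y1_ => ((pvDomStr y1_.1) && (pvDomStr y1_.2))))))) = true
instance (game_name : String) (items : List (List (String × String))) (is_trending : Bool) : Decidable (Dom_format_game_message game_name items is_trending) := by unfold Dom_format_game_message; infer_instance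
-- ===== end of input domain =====

-- B replaces A's fused build-and-check loop with length arithmetic: it formats all lines,
-- computes from prefix sums of their lengths how many fit (k), and assembles the output once
-- as header ++ join(lines[:k]) ++ optional tail; objective 'alternative' (no speed claim).

-- item.get(k, d) on a Python dict (association list per the type convention)
def pvGet (item : List (String × String)) (k d : String) : String :=
  PySem.Dict.getD (PySem.Dict.mk item) k d

-- ===== PORT A =====
-- A's single loop: formats each item inline and appends, breaking on overflow.
def pvALoop (total : Int) (rest : List (List (String × String))) (idx : Int) (message : String) : String :=
  match rest with
  | [] => message
  | item :: rest' =>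
    let source := pvGet item "source" "Unknown"
    let title0 := PySem.Str.strip (pvGet item "title" "No title")
    let url := pvGet item "url" ""
    let title := if PySem.Str.len title0 > 100 then PySem.Str.slice title0 none (some 97) ++ "..." else title0
    let line := PySem.Int.toStr idx ++ ". [" ++ source ++ "] " ++ title ++ " - <" ++ url ++ ">\n"
    if PySem.Str.len message + PySem.Str.len line > 2000 then
      if (2000 : Int) - (PySem.Str.len message : Int) - 20 > 0 then
        message ++ "... and " ++ PySem.Int.toStr (total - idx + 1) ++ " more items"
      else message
    else pvALoop total rest' (idx + 1) (message ++ line)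

def format_game_message (game_name : String) (items : List (List (String × String))) (is_trending : Bool) : String :=
  if items = [] then
    let fallback := if is_trending then "No trending news found this week." else "No new content found this week."
    "**" ++ game_name ++ " - Top " ++ PySem.Int.toStr (items.length : Int) ++ "**\n\n" ++ fallback
  else
    let message := "**" ++ game_name ++ " - Top " ++ PySem.Int.toStr (items.length : Int) ++ "**\n\n"
    pvALoop (items.length : Int) items 1 message

-- ===== PORT B =====
-- B pass 1: fully format one line (helper _format_line of Source B)
def pvBLine (idx : Int) (item : List (String × String)) : String :=
  let source := pvGet item "source" "Unknown"
  let title0 := PySem.Str.strip (pvGet item "title" "No title")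
  let title := if PySem.Str.len title0 > 100 then PySem.Str.slice title0 none (some 97) ++ "..." else title0
  let url := pvGet item "url" ""
  PySem.Int.toStr idx ++ ". [" ++ source ++ "] " ++ title ++ " - <" ++ url ++ ">\n"

-- B pass 2: prefix sums of line lengths -> (k, used): how many lines fit in 2000, length used
def pvBCut (lens : List Int) (k used total : Int) : Int × Int :=
  match lens with
  | [] => (k, used)
  | l :: ls =>
    let total' := total + l
    if total' ≤ 2000 then pvBCut ls (k + 1) total' total'
    else pvBCut ls k used total'

-- B pass 3: assemble once
def format_game_message_alt (game_name : String) (items : List (List (String × String))) (is_trending : Bool) : String :=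
  let n : Int := (items.length : Int)
  let header := "**" ++ game_name ++ " - Top " ++ PySem.Int.toStr n ++ "**\n\n"
  if items = [] then
    header ++ (if is_trending then "No trending news found this week." else "No new content found this week.")
  else
    let lines := (PySem.List.enumerate items 1).map (fun p => pvBLine p.1 p.2)
    let h := PySem.Str.len header
    let ku := pvBCut (lines.map PySem.Str.len) 0 h h
    if ku.1 = n then header ++ PySem.Str.join "" lines
    else
      let tail := if (2000 : Int) - ku.2 - 20 > 0 then "... and " ++ PySem.Int.toStr (n - ku.1) ++ " more items" else ""
      header ++ PySem.Str.join "" (PySem.List.slice lines none (some ku.1)) ++ tail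

-- ===== PRECONDITION & SPEC =====
def Spec_format_game_message (game_name : String) (items : List (List (String × String))) (is_trending : Bool) (out : String) : Prop := out = format_game_message_alt game_name items is_trending
instance (game_name : String) (items : List (List (String × String))) (is_trending : Bool) (out : String) : Decidable (Spec_format_game_message game_name items is_trending out) := by unfold Spec_format_game_message; infer_instance

-- ===== CLAIM (what is proved, stated in full; the proofs are below) =====
def Claim_equal_format_game_message : Prop := ∀ (game_name : String) (items : List (List (String × String))) (is_trending : Bool), Dom_format_game_message game_name items is_trending → Spec_format_game_message game_name items is_trending (format_game_message game_name items is_trending)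

-- ===== LEMMAS AND PROOFS =====
-- B's assembly (passes 2+3) as a function of the precomputed lines, with A's general tail index
def pvAsm (total idx : Int) (msg : String) (lines : List String) : String :=
  let m := PySem.Str.len msg
  let ku := pvBCut (lines.map PySem.Str.len) 0 m m
  if ku.1 = (lines.length : Int) then msg ++ PySem.Str.join "" lines
  else
    msg ++ PySem.Str.join "" (PySem.List.slice lines none (some ku.1)) ++
      (if (2000 : Int) - ku.2 - 20 > 0 then
        "... and " ++ PySem.Int.toStr (total - (idx + ku.1) + 1) ++ " more items"
       else "")

-- pvBCut only ever increments k
lemma pvBCut_shift (lens : List Int) : ∀ (k used total c : Int),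
    pvBCut lens (k + c) used total = ((pvBCut lens k used total).1 + c, (pvBCut lens k used total).2) := by
  induction lens with
  | nil => intro k used total c; simp [pvBCut]
  | cons l ls ih =>
    intro k used total c
    simp only [pvBCut]
    split_ifs with h
    · rw [show k + c + 1 = (k + 1) + c by ring, ih]
    · exact ih k used _ c

lemma pvBCut_fst_nonneg (lens : List Int) : ∀ (used total : Int), 0 ≤ (pvBCut lens 0 used total).1 := by
  induction lens with
  | nil => intro used total; simp [pvBCut]
  | cons l ls ih =>
    intro used total
    simp only [pvBCut]
    split_ifs with h
    · rw [show (1 : Int) = 0 + 1 by ring, pvBCut_shift]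
      have := ih (total + l) (total + l); omega
    · exact ih used _

-- once the running total exceeds 2000 (lengths nonnegative) nothing more is counted
lemma pvBCut_gt (lens : List Int) : ∀ (k used total : Int), (∀ l ∈ lens, 0 ≤ l) → 2000 < total →
    pvBCut lens k used total = (k, used) := by
  induction lens with
  | nil => intro k used total _ _; simp [pvBCut]
  | cons l ls ih =>
    intro k used total hnn ht
    have hl : 0 ≤ l := hnn l (by simp)
    simp only [pvBCut]
    rw [if_neg (by omega)]
    exact ih k used _ (fun x hx => hnn x (by simp [hx])) (by omega)

lemma pvLen_nonneg (s : String) : 0 ≤ PySem.Str.len s := by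
  simp [PySem.Str.len_eq]

lemma pvJoin_nil : PySem.Str.join "" ([] : List String) = "" := by
  simp [PySem.Str.join]

lemma pvJoin_cons (a : String) (as_ : List String) :
    PySem.Str.join "" (a :: as_) = a ++ PySem.Str.join "" as_ := by
  cases as_ with
  | nil => simp [PySem.Str.join]
  | cons b bs => simp [PySem.Str.join, PySem.Chars.join_cons_cons]

lemma pvAsm_nil (total idx : Int) (msg : String) : pvAsm total idx msg [] = msg := by
  simp [pvAsm, pvBCut, pvJoin_nil]

lemma pvAsm_cons_fit (total idx : Int) (msg L : String) (ls : List String)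
    (hfit : PySem.Str.len msg + PySem.Str.len L ≤ 2000) :
    pvAsm total idx msg (L :: ls) = pvAsm total (idx + 1) (msg ++ L) ls := by
  have hm' : PySem.Str.len (msg ++ L) = PySem.Str.len msg + PySem.Str.len L :=
    PySem.Str.len_append msg L
  have hk0 : 0 ≤ (pvBCut (ls.map PySem.Str.len) 0 (PySem.Str.len msg + PySem.Str.len L)
      (PySem.Str.len msg + PySem.Str.len L)).1 := pvBCut_fst_nonneg _ _ _
  simp only [pvAsm, List.map_cons, pvBCut, hm']
  rw [if_pos hfit, show (1 : Int) = 0 + 1 by ring, pvBCut_shift]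
  simp only [zero_add]
  set ku := pvBCut (ls.map PySem.Str.len) 0 (PySem.Str.len msg + PySem.Str.len L)
      (PySem.Str.len msg + PySem.Str.len L) with hku
  simp only [List.length_cons]
  by_cases hend : ku.1 = (ls.length : Int)
  · rw [if_pos (by push_cast; omega), if_pos hend, pvJoin_cons, ← String.append_assoc]
  · rw [if_neg (by push_cast; omega), if_neg hend]
    have hslice : PySem.List.slice (L :: ls) none (some (ku.1 + 1))
        = L :: PySem.List.slice ls none (some ku.1) := by
      rw [PySem.List.slice_to _ (by omega), PySem.List.slice_to _ (by omega)]
      have : (ku.1 + 1).toNat = ku.1.toNat + 1 := by omega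
      rw [this, List.take_succ_cons]
    rw [hslice, pvJoin_cons, ← String.append_assoc]
    have : total - (idx + (ku.1 + 1)) + 1 = total - (idx + 1 + ku.1) + 1 := by ring
    rw [this]

lemma pvAsm_cons_over (total idx : Int) (msg L : String) (ls : List String)
    (hover : 2000 < PySem.Str.len msg + PySem.Str.len L) :
    pvAsm total idx msg (L :: ls) =
      if (2000 : Int) - PySem.Str.len msg - 20 > 0 then
        msg ++ "... and " ++ PySem.Int.toStr (total - idx + 1) ++ " more items"
      else msg := by
  have hL : 0 ≤ PySem.Str.len L := pvLen_nonneg L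
  have hcut : pvBCut ((L :: ls).map PySem.Str.len) 0 (PySem.Str.len msg) (PySem.Str.len msg)
      = (0, PySem.Str.len msg) := by
    simp only [List.map_cons, pvBCut]
    rw [if_neg (show ¬(PySem.Str.len msg + PySem.Str.len L ≤ 2000) by omega)]
    exact pvBCut_gt _ 0 (PySem.Str.len msg) _
      (by intro x hx; simp only [List.mem_map] at hx; obtain ⟨t, _, rfl⟩ := hx; exact pvLen_nonneg t)
      (by omega)
  simp only [pvAsm, hcut]
  rw [if_neg (show ¬((0, PySem.Str.len msg).1 = ((L :: ls).length : Int)) by simp; omega)]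
  rw [PySem.List.slice_to _ (by omega)]
  simp only [Int.toNat_zero, List.take_zero, pvJoin_nil]
  split_ifs with h
  · rw [show total - (idx + 0) + 1 = total - idx + 1 by ring]
    simp [String.append_assoc]
  · simp

-- A's inline line value is B's _format_line
lemma pvALoop_cons (total idx : Int) (msg : String) (item : List (String × String))
    (rest' : List (List (String × String))) :
    pvALoop total (item :: rest') idx msg =
      if PySem.Str.len msg + PySem.Str.len (pvBLine idx item) > 2000 then
        if (2000 : Int) - PySem.Str.len msg - 20 > 0 then
          msg ++ "... and " ++ PySem.Int.toStr (total - idx + 1) ++ " more items"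
        else msg
      else pvALoop total rest' (idx + 1) (msg ++ pvBLine idx item) := by
  simp only [pvALoop, pvBLine]

-- A's fused loop equals B's arithmetic cutoff + slice/join assembly
lemma pvLoop_eq (total : Int) (rest : List (List (String × String))) :
    ∀ (idx : Int) (msg : String),
      pvALoop total rest idx msg =
        pvAsm total idx msg ((PySem.List.enumerate rest idx).map (fun p => pvBLine p.1 p.2)) := by
  induction rest with
  | nil => intro idx msg; simp [pvALoop, PySem.List.enumerate, pvAsm_nil]
  | cons item rest' ih =>
    intro idx msg
    rw [pvALoop_cons, PySem.List.enumerate_cons]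
    simp only [List.map_cons]
    by_cases hfit : PySem.Str.len msg + PySem.Str.len (pvBLine idx item) ≤ 2000
    · rw [if_neg (by omega), pvAsm_cons_fit _ _ _ _ _ hfit, ih]
    · rw [if_pos (by omega), pvAsm_cons_over _ _ _ _ _ (by omega)]

-- ===== VERDICT (by name: the statement is the Claim_ definition above) =====
theorem format_game_message_spec : Claim_equal_format_game_message := by
  intro game_name items is_trending _
  unfold Spec_format_game_message format_game_message format_game_message_alt
  by_cases h : items = []
  · rw [if_pos h, if_pos h]
  · rw [if_neg h, if_neg h]
    dsimp only []
    rw [pvLoop_eq]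
    simp only [pvAsm]
    have hlen : ((((PySem.List.enumerate items 1).map (fun p => pvBLine p.1 p.2)).length : Nat) : Int)
        = (items.length : Int) := by
      simp [PySem.List.length_enumerate]
    rw [hlen]
    have harg : ∀ b : Int, (items.length : Int) - (1 + b) + 1 = (items.length : Int) - b :=
      fun b => by ring
    rw [harg]
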